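-- pv_equiv track=rewrite | github.com/JaeHongChoe/codetree-TILs | 240329/외계어 사전/외계어 사전.py | solution
-- ===== SOURCE A (Python) =====
-- def solution(spell, dic):
--
--     for i in dic:
--         if len(spell) == len(i):
--             temp = spell.copy()
--             ans =0
--             for k in i:
--                 if k in temp:
--                     temp[temp.index(k)] = 0
--                     ans+=1
--                 else:
--                     continue
--             if ans == len(spell):
--                 return 1
--     return 2
-- ===== SOURCE B (Python) =====
-- def solution(spell, dic):
--     key = sorted(spell)
--     for i in dic:
--         if sorted(i) == key:
--             return 1
--     return 2
-- ===== Notes on version B (the rewrite author's own statement) =====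
-- stated objective: idiomatic
-- what changed: Replaces A's per-word copy, membership scan, index lookup and sentinel-zeroing with a single precomputed sorted key compared against sorted(word); multiset equality becomes one sorted-list comparison.
import Mathlib
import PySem

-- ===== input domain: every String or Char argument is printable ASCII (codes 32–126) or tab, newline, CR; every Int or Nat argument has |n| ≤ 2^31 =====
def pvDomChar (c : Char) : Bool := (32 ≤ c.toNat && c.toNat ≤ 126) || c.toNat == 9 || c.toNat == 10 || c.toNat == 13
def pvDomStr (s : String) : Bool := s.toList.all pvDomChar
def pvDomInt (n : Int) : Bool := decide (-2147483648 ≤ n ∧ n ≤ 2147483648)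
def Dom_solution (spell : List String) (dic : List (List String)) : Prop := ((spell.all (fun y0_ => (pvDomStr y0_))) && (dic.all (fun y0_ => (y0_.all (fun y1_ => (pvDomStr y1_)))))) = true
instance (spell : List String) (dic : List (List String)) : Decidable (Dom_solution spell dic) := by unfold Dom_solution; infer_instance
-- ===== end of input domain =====

-- B replaces A's per-word copy/scan/zeroing with one precomputed sorted key compared to sorted(word) (idiomatic).

-- ===== PORT A =====
-- temp holds Python's mixed list of strings and the sentinel 0: `some s` is a string, `none` is 0
-- (0 never equals a string in Python, so `k in temp` is exactly `some k ∈ temp`).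
def pvSetZero (temp : List (Option String)) (k : String) : List (Option String) :=
  -- temp[temp.index(k)] = 0
  match PySem.List.index? temp (some k) with
  | some j => temp.set j none
  | none => temp

-- for k in i: if k in temp: temp[temp.index(k)] = 0; ans += 1
def pvInner : List String → List (Option String) × Int → List (Option String) × Int
  | [], st => st
  | k :: ks, (temp, ans) =>
    if some k ∈ temp then pvInner ks (pvSetZero temp k, ans + 1)
    else pvInner ks (temp, ans)

def solution (spell : List String) (dic : List (List String)) : Int :=
  match dic with
  | [] => 2
  | i :: rest =>
    if (spell.length : Int) = (i.length : Int) then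
      let st := pvInner i (spell.map some, 0)
      if st.2 = (spell.length : Int) then 1 else solution spell rest
    else solution spell rest

-- ===== PORT B =====
def pvBLoop (key : List String) : List (List String) → Int
  | [] => 2
  | i :: rest => if PySem.List.sorted i (fun x => x) false = key then 1 else pvBLoop key rest

def solution_alt (spell : List String) (dic : List (List String)) : Int :=
  pvBLoop (PySem.List.sorted spell (fun x => x) false) dic

-- ===== PRECONDITION & SPEC =====
def Spec_solution (spell : List String) (dic : List (List String)) (out : Int) : Prop := out = solution_alt spell dic
instance (spell : List String) (dic : List (List String)) (out : Int) : Decidable (Spec_solution spell dic out) := by unfold Spec_solution; infer_instance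

-- ===== CLAIM (what is proved, stated in full; the proofs are below) =====
def Claim_equal_solution : Prop := ∀ (spell : List String) (dic : List (List String)), Dom_solution spell dic → Spec_solution spell dic (solution spell dic)

-- ===== LEMMAS AND PROOFS =====

-- the strings still present in temp (the un-zeroed slots)
def pvStrs : List (Option String) → List String
  | [] => []
  | none :: ts => pvStrs ts
  | some s :: ts => s :: pvStrs ts

-- greedy matching count of ks against the multiset m
def pvMatchCount : List String → Multiset String → Nat
  | [], _ => 0
  | k :: ks, m => if k ∈ m then pvMatchCount ks (m.erase k) + 1 else pvMatchCount ks m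

theorem pvSetZero_cons (t : Option String) (ts : List (Option String)) (k : String) :
    pvSetZero (t :: ts) k =
      if t = some k then none :: ts else t :: pvSetZero ts k := by
  by_cases h : t = some k
  · subst h
    unfold pvSetZero
    simp [PySem.List.index?_eq_idxOf?, List.idxOf?, List.findIdx?_cons]
  · have hidx : PySem.List.index? (t :: ts) (some k)
        = (PySem.List.index? ts (some k)).map (· + 1) := by
      simp [PySem.List.index?_eq_idxOf?, List.idxOf?, List.findIdx?_cons, h]
    unfold pvSetZero
    rw [hidx, if_neg h]
    cases PySem.List.index? ts (some k) <;> simp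

theorem pvStrs_map_some (l : List String) : pvStrs (l.map some) = l := by
  induction l with
  | nil => rfl
  | cons x xs ih => simp [pvStrs, ih]

theorem mem_pvStrs (temp : List (Option String)) (k : String) :
    k ∈ pvStrs temp ↔ some k ∈ temp := by
  induction temp with
  | nil => simp [pvStrs]
  | cons t ts ih =>
    cases t with
    | none => simp [pvStrs, ih]
    | some s => simp [pvStrs, ih]

theorem pvSetZero_multiset (temp : List (Option String)) (k : String)
    (h : some k ∈ temp) :
    (pvStrs (pvSetZero temp k) : Multiset String)
      = ((pvStrs temp : List String) : Multiset String).erase k := by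
  induction temp with
  | nil => simp at h
  | cons t ts ih =>
    rw [pvSetZero_cons]
    by_cases hk : t = some k
    · subst hk
      simp [pvStrs]
    · rw [if_neg hk]
      have hmem : some k ∈ ts := by
        rcases List.mem_cons.mp h with h1 | h1
        · exact absurd h1.symm hk
        · exact h1
      cases t with
      | none => simpa [pvStrs] using ih hmem
      | some s =>
        have hs : k ≠ s := fun hsk => hk (by rw [hsk])
        show ((s :: pvStrs (pvSetZero ts k) : List String) : Multiset String)
          = ((s :: pvStrs ts : List String) : Multiset String).erase k
        rw [← Multiset.cons_coe, ← Multiset.cons_coe,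
          Multiset.erase_cons_tail_of_mem (by simpa [mem_pvStrs] using hmem), ih hmem]

theorem pvInner_snd (ks : List String) :
    ∀ (temp : List (Option String)) (ans : Int),
      (pvInner ks (temp, ans)).2
        = ans + (pvMatchCount ks ((pvStrs temp : List String) : Multiset String) : Int) := by
  induction ks with
  | nil => intro temp ans; simp [pvInner, pvMatchCount]
  | cons k ks ih =>
    intro temp ans
    by_cases h : some k ∈ temp
    · have hm : k ∈ ((pvStrs temp : List String) : Multiset String) := by
        simpa [Multiset.mem_coe, mem_pvStrs] using h
      simp only [pvInner, if_pos h, pvMatchCount, if_pos hm]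
      rw [ih, pvSetZero_multiset temp k h]
      push_cast
      ring
    · have hm : k ∉ ((pvStrs temp : List String) : Multiset String) := by
        simpa [Multiset.mem_coe, mem_pvStrs] using h
      simp only [pvInner, if_neg h, pvMatchCount, if_neg hm]
      exact ih temp ans

theorem pvMatchCount_le (ks : List String) : ∀ m, pvMatchCount ks m ≤ ks.length := by
  induction ks with
  | nil => intro m; simp [pvMatchCount]
  | cons k ks ih =>
    intro m
    unfold pvMatchCount
    split_ifs
    · simpa using Nat.succ_le_succ (ih _)
    · exact Nat.le_succ_of_le (ih m)

theorem pvMatchCount_eq_iff (ks : List String) :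
    ∀ m : Multiset String, pvMatchCount ks m = ks.length ↔ (ks : Multiset String) ≤ m := by
  induction ks with
  | nil => intro m; simp [pvMatchCount]
  | cons k ks ih =>
    intro m
    unfold pvMatchCount
    by_cases hk : k ∈ m
    · rw [if_pos hk]
      have hcons : (↑(k :: ks) : Multiset String) ≤ m ↔ (↑ks : Multiset String) ≤ m.erase k := by
        conv_lhs => rw [← Multiset.cons_erase hk]
        rw [← Multiset.cons_coe]
        exact Multiset.cons_le_cons_iff k
      rw [hcons, ← ih]
      simp
    · rw [if_neg hk]
      constructor
      · intro h
        exfalso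
        have := pvMatchCount_le ks m
        rw [List.length_cons] at h
        omega
      · intro h
        exfalso
        exact hk (Multiset.mem_of_le h (by simp))

theorem pvWord_iff (spell i : List String) :
    ((spell.length : Int) = (i.length : Int)
        ∧ (pvInner i (spell.map some, 0)).2 = (spell.length : Int))
      ↔ i.Perm spell := by
  rw [pvInner_snd, pvStrs_map_some]
  constructor
  · rintro ⟨hlen, hans⟩
    have hlen' : spell.length = i.length := by exact_mod_cast hlen
    have hans' : pvMatchCount i (↑spell) = i.length := by omega
    have hle : (↑i : Multiset String) ≤ ↑spell := (pvMatchCount_eq_iff i _).mp hans'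
    have heq : (↑i : Multiset String) = ↑spell :=
      Multiset.eq_of_le_of_card_le hle (by simpa using hlen'.le)
    exact Multiset.coe_eq_coe.mp heq
  · intro hperm
    have hlen' : i.length = spell.length := hperm.length_eq
    have hle : (↑i : Multiset String) ≤ ↑spell := le_of_eq (Multiset.coe_eq_coe.mpr hperm)
    have hmc := (pvMatchCount_eq_iff i (↑spell)).mpr hle
    refine ⟨by exact_mod_cast hlen'.symm, ?_⟩
    rw [hmc]
    omega

theorem pvSorted_iff (spell i : List String) :
    PySem.List.sorted i (fun x => x) false = PySem.List.sorted spell (fun x => x) false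
      ↔ i.Perm spell :=
  PySem.List.sorted_id_eq_sorted_id_iff_perm i spell

theorem solution_eq_alt (spell : List String) :
    ∀ dic, solution spell dic = solution_alt spell dic := by
  intro dic
  induction dic with
  | nil => rfl
  | cons i rest ih =>
    show (if (spell.length : Int) = (i.length : Int) then
            if (pvInner i (spell.map some, 0)).2 = (spell.length : Int) then 1
            else solution spell rest
          else solution spell rest)
        = if PySem.List.sorted i (fun x => x) false
              = PySem.List.sorted spell (fun x => x) false then 1
          else pvBLoop (PySem.List.sorted spell (fun x => x) false) rest
    by_cases hp : i.Perm spell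
    · obtain ⟨hlen, hans⟩ := (pvWord_iff spell i).mpr hp
      rw [if_pos hlen, if_pos hans, if_pos ((pvSorted_iff spell i).mpr hp)]
    · have hsort : ¬ PySem.List.sorted i (fun x => x) false
          = PySem.List.sorted spell (fun x => x) false :=
        fun h => hp ((pvSorted_iff spell i).mp h)
      rw [if_neg hsort]
      by_cases hlen : (spell.length : Int) = (i.length : Int)
      · have hans : ¬ (pvInner i (spell.map some, 0)).2 = (spell.length : Int) :=
          fun h => hp ((pvWord_iff spell i).mp ⟨hlen, h⟩)
        rw [if_pos hlen, if_neg hans]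
        exact ih
      · rw [if_neg hlen]
        exact ih

-- ===== VERDICT (by name: the statement is the Claim_ definition above) =====
theorem solution_spec : Claim_equal_solution := by
  intro spell dic _
  unfold Spec_solution
  exact solution_eq_alt spell dic
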